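-- pv_equiv track=rewrite | github.com/ai-dynamo/aiconfigurator | src/aiconfigurator/sdk/interpolation.py | nearest_1d_point_helper
-- ===== SOURCE A (Python) =====
-- def nearest_1d_point_helper(x: int, values: list[int], inner_only: bool = True) -> tuple[int, int]:
--     """
--     Find the nearest 1d point
--     """
--     assert values is not None and len(values) >= 2, "values is None or len(values) < 2"
--     sorted_values = sorted(values)
--
--     if x < sorted_values[0]:
--         if inner_only:
--             raise ValueError(f"x is less than the smallest value in the list. {x=}, {sorted_values=}")
--         else:
--             return sorted_values[0], sorted_values[1]
--     elif x > sorted_values[-1]: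
--         if inner_only:
--             raise ValueError(f"x is greater than the largest value in the list. {x=}, {sorted_values=}")
--         else:
--             return sorted_values[-2], sorted_values[-1]
--
--     for i, value in enumerate(sorted_values):
--         if x >= value and i != len(sorted_values) - 1:
--             continue
--         else:
--             end = value
--             start = sorted_values[i - 1]
--             break
--     if start is None or end is None:
--         raise ValueError(f"start or end is None. {x=}, {sorted_values=}, start={start=}, end={end=}")
--     return start, end
-- ===== SOURCE B (Python) =====
-- def nearest_1d_point_helper(x: int, values: list[int], inner_only: bool = True) -> tuple[int, int]:
--     """Single O(n) pass: track the two smallest, the two largest, the largest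
--     value <= x and the smallest value > x; no sort needed."""
--     assert values is not None and len(values) >= 2, "values is None or len(values) < 2"
--     min1 = min2 = max1 = max2 = lo = hi = None
--     for v in values:
--         if min1 is None or v < min1:
--             min1, min2 = v, min1
--         elif min2 is None or v < min2:
--             min2 = v
--         if max1 is None or v > max1:
--             max1, max2 = v, max1
--         elif max2 is None or v > max2:
--             max2 = v
--         if v <= x and (lo is None or v > lo):
--             lo = v
--         if v > x and (hi is None or v < hi):
--             hi = v
--     if x < min1:
--         if inner_only:
--             raise ValueError(f"x is less than the smallest value in the list. {x=}")
--         return min1, min2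
--     if hi is None:
--         if inner_only and x > max1:
--             raise ValueError(f"x is greater than the largest value in the list. {x=}")
--         return max2, max1
--     return lo, hi
-- ===== Notes on version B (the rewrite author's own statement) =====
-- stated objective: alternative
-- what changed: replaces A's sort-then-linear-scan with a single pass over the unsorted list that tracks the two smallest values, the two largest values, the largest value <= x and the smallest value > x
import Mathlib
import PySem

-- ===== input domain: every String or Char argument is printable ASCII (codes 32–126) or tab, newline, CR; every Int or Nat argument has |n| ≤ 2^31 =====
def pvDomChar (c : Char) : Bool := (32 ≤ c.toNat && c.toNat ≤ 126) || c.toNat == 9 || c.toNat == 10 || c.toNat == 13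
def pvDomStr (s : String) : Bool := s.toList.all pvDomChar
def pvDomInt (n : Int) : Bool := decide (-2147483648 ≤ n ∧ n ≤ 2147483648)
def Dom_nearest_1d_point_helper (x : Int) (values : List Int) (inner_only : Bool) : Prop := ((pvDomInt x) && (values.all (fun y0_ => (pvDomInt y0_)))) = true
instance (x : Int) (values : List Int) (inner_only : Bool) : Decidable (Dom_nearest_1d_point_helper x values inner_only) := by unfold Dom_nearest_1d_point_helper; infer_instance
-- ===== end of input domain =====

-- B replaces A's sort-then-linear-scan by a single pass over the unsorted list
-- tracking the two smallest, the two largest, the largest value ≤ x and the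
-- smallest value > x (objective: alternative, no sort).

-- ===== PORT A =====
-- A's `for i, value in enumerate(sorted_values)` loop; `(0, 0)` stands on the
-- fall-through path Python can never reach (the loop always breaks at i = n-1).
def pvALoop (x : Int) (n : Nat) (s : List Int) (i : Nat) (l : List Int) : Int × Int :=
  match l with
  | [] => (0, 0)
  | v :: t =>
    if x ≥ v ∧ i ≠ n - 1 then pvALoop x n s (i + 1) t
    else (PySem.List.pyGetD s ((i : Int) - 1) 0, v)

-- `(0, 0)` stands on the raising paths (assert and the two ValueError), all outside Pre_.
def nearest_1d_point_helper (x : Int) (values : List Int) (inner_only : Bool) : Int × Int :=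
  if values.length < 2 then (0, 0)
  else
    let s := PySem.List.sorted values (fun v => v) false
    if x < PySem.List.pyGetD s 0 0 then
      (if inner_only then (0, 0) else (PySem.List.pyGetD s 0 0, PySem.List.pyGetD s 1 0))
    else if x > PySem.List.pyGetD s (-1) 0 then
      (if inner_only then (0, 0) else (PySem.List.pyGetD s (-2) 0, PySem.List.pyGetD s (-1) 0))
    else pvALoop x s.length s 0 s

-- ===== PORT B =====
-- `if min1 is None or v < min1: min1, min2 = v, min1  elif min2 is None or v < min2: min2 = v`
def pvMinPair (st : Option Int × Option Int) (v : Int) : Option Int × Option Int :=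
  match st with
  | (none, _) => (some v, none)
  | (some m1, m2) =>
    if v < m1 then (some v, some m1)
    else match m2 with
      | none => (some m1, some v)
      | some m2' => if v < m2' then (some m1, some v) else (some m1, some m2')

def pvMaxPair (st : Option Int × Option Int) (v : Int) : Option Int × Option Int :=
  match st with
  | (none, _) => (some v, none)
  | (some m1, m2) =>
    if v > m1 then (some v, some m1)
    else match m2 with
      | none => (some m1, some v)
      | some m2' => if v > m2' then (some m1, some v) else (some m1, some m2')

-- `if v <= x and (lo is None or v > lo): lo = v`
def pvLo (x : Int) (lo : Option Int) (v : Int) : Option Int :=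
  if v ≤ x then (match lo with | none => some v | some l => if v > l then some v else some l) else lo

-- `if v > x and (hi is None or v < hi): hi = v`
def pvHi (x : Int) (hi : Option Int) (v : Int) : Option Int :=
  if v > x then (match hi with | none => some v | some h => if v < h then some v else some h) else hi

def pvStep (x : Int)
    (st : (Option Int × Option Int) × (Option Int × Option Int) × Option Int × Option Int)
    (v : Int) : (Option Int × Option Int) × (Option Int × Option Int) × Option Int × Option Int :=
  (pvMinPair st.1 v, pvMaxPair st.2.1 v, pvLo x st.2.2.1 v, pvHi x st.2.2.2 v)

-- `(0, 0)` stands on the raising paths (assert and the two ValueError), all outside Pre_.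
def nearest_1d_point_helper_alt (x : Int) (values : List Int) (inner_only : Bool) : Int × Int :=
  if values.length < 2 then (0, 0)
  else
    match values.foldl (pvStep x) ((none, none), (none, none), none, none) with
    | ((some m1, m2), (some M1, M2), lo, hi) =>
      if x < m1 then (if inner_only then (0, 0) else (m1, m2.getD 0))
      else
        match hi with
        | none => if inner_only && decide (x > M1) then (0, 0) else (M2.getD 0, M1)
        | some h => (lo.getD 0, h)
    | _ => (0, 0)

-- ===== PRECONDITION & SPEC =====
-- Pre_ excludes exactly the raising inputs: the assert (len < 2) and, with
-- inner_only, x below the minimum or above the maximum of values (ValueError).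
def Pre_nearest_1d_point_helper (x : Int) (values : List Int) (inner_only : Bool) : Prop :=
  2 ≤ values.length ∧ (inner_only = true → (∃ v ∈ values, v ≤ x) ∧ (∃ v ∈ values, x ≤ v))
instance (x : Int) (values : List Int) (inner_only : Bool) : Decidable (Pre_nearest_1d_point_helper x values inner_only) := by unfold Pre_nearest_1d_point_helper; infer_instance

def pvWitness_nearest_1d_point_helper : Int × List Int × Bool := (5, [10, 1, 7], true)

def Spec_nearest_1d_point_helper (x : Int) (values : List Int) (inner_only : Bool) (out : Int × Int) : Prop := out = nearest_1d_point_helper_alt x values inner_only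
instance (x : Int) (values : List Int) (inner_only : Bool) (out : Int × Int) : Decidable (Spec_nearest_1d_point_helper x values inner_only out) := by unfold Spec_nearest_1d_point_helper; infer_instance

-- ===== CLAIM (what is proved, stated in full; the proofs are below) =====
def Claim_equal_nearest_1d_point_helper : Prop := ∀ (x : Int) (values : List Int) (inner_only : Bool), Dom_nearest_1d_point_helper x values inner_only → Pre_nearest_1d_point_helper x values inner_only → Spec_nearest_1d_point_helper x values inner_only (nearest_1d_point_helper x values inner_only)

-- ===== LEMMAS AND PROOFS =====

theorem pvMinPair_comm (st : Option Int × Option Int) (a b : Int) :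
    pvMinPair (pvMinPair st a) b = pvMinPair (pvMinPair st b) a := by
  obtain ⟨m1, m2⟩ := st
  rcases m1 with _ | m1 <;> rcases m2 with _ | m2 <;>
    simp only [pvMinPair] <;> split_ifs <;>
    (try simp only [pvMinPair]) <;> (try split_ifs) <;>
    first | rfl | omega | (simp_all; omega)

theorem pvMaxPair_comm (st : Option Int × Option Int) (a b : Int) :
    pvMaxPair (pvMaxPair st a) b = pvMaxPair (pvMaxPair st b) a := by
  obtain ⟨m1, m2⟩ := st
  rcases m1 with _ | m1 <;> rcases m2 with _ | m2 <;>
    simp only [pvMaxPair] <;> split_ifs <;>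
    (try simp only [pvMaxPair]) <;> (try split_ifs) <;>
    first | rfl | omega | (simp_all; omega)

theorem pvLo_comm (x : Int) (lo : Option Int) (a b : Int) :
    pvLo x (pvLo x lo a) b = pvLo x (pvLo x lo b) a := by
  rcases lo with _ | l <;>
    simp only [pvLo] <;> split_ifs <;>
    (try simp only [pvLo]) <;> (try split_ifs) <;>
    first | rfl | omega | (simp_all; omega)

theorem pvHi_comm (x : Int) (hi : Option Int) (a b : Int) :
    pvHi x (pvHi x hi a) b = pvHi x (pvHi x hi b) a := by
  rcases hi with _ | h <;>
    simp only [pvHi] <;> split_ifs <;>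
    (try simp only [pvHi]) <;> (try split_ifs) <;>
    first | rfl | omega | (simp_all; omega)

theorem pvStep_comm (x : Int) (st : (Option Int × Option Int) × (Option Int × Option Int) × Option Int × Option Int) (a b : Int) :
    pvStep x (pvStep x st a) b = pvStep x (pvStep x st b) a := by
  obtain ⟨p, q, lo, hi⟩ := st
  simp only [pvStep]
  exact Prod.ext (pvMinPair_comm p a b)
    (Prod.ext (pvMaxPair_comm q a b) (Prod.ext (pvLo_comm x lo a b) (pvHi_comm x hi a b)))

-- ---- the four step lemmas for a maximal new element a ----

theorem pvMinPair_step (s : List Int) (a : Int) (hne : s ≠ []) (hle : ∀ v ∈ s, v ≤ a) :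
    pvMinPair (s.head?, s.tail.head?) a = ((s ++ [a]).head?, (s ++ [a]).tail.head?) := by
  rcases s with _ | ⟨u, t⟩
  · exact absurd rfl hne
  rcases t with _ | ⟨w, t'⟩
  · have hu : u ≤ a := hle u (by simp)
    simp [pvMinPair, show ¬ a < u by omega]
  · have hu : u ≤ a := hle u (by simp)
    have hw : w ≤ a := hle w (by simp)
    simp [pvMinPair, show ¬ a < u by omega, show ¬ a < w by omega]

theorem pvMaxPair_step (s : List Int) (a : Int) (hne : s ≠ []) (hle : ∀ v ∈ s, v ≤ a) :
    pvMaxPair (s.getLast?, s.dropLast.getLast?) a = ((s ++ [a]).getLast?, (s ++ [a]).dropLast.getLast?) := by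
  obtain ⟨s', L, rfl⟩ := List.eq_nil_or_concat s |>.resolve_left hne
  have hL : L ≤ a := hle L (by simp)
  simp only [List.concat_eq_append]
  rw [List.getLast?_concat, List.dropLast_concat, List.getLast?_concat,
    show (s' ++ [L] ++ [a]).dropLast = s' ++ [L] from List.dropLast_concat, List.getLast?_concat]
  rcases h2 : s'.getLast? with _ | m2
  · simp only [pvMaxPair]
    split_ifs with h
    · rfl
    · simp; omega
  · have hm2 : m2 ≤ a := hle m2 (by simp [List.mem_of_getLast? h2])
    simp only [pvMaxPair]
    split_ifs <;> simp <;> omega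

theorem pvLo_step (x : Int) (s : List Int) (a : Int) (hle : ∀ v ∈ s, v ≤ a) :
    pvLo x ((s.filter (fun v => decide (v ≤ x))).getLast?) a
      = (((s ++ [a]).filter (fun v => decide (v ≤ x)))).getLast? := by
  rw [List.filter_append]
  by_cases hax : a ≤ x
  · rw [show List.filter (fun v => decide (v ≤ x)) [a] = [a] by simp [hax], List.getLast?_concat]
    rcases hP : (s.filter (fun v => decide (v ≤ x))).getLast? with _ | l
    · simp [pvLo, hax]
    · have hl : l ≤ a := hle l (List.mem_of_mem_filter (List.mem_of_getLast? hP))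
      simp only [pvLo, if_pos hax]
      split_ifs <;> simp <;> omega
  · rw [show List.filter (fun v => decide (v ≤ x)) [a] = [] by simp [hax], List.append_nil]
    simp [pvLo, hax]

theorem pvHi_step (x : Int) (s : List Int) (a : Int) (hle : ∀ v ∈ s, v ≤ a) :
    pvHi x ((s.filter (fun v => decide (x < v))).head?) a
      = (((s ++ [a]).filter (fun v => decide (x < v)))).head? := by
  rw [List.filter_append]
  by_cases hax : x < a
  · rw [show List.filter (fun v => decide (x < v)) [a] = [a] by simp [hax]]
    rcases hQ : s.filter (fun v => decide (x < v)) with _ | ⟨q, Qt⟩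
    · simp [pvHi, hax]
    · have hq : q ≤ a := hle q (List.mem_of_mem_filter (by rw [hQ]; simp))
      simp [pvHi, hax, show ¬ a < q by omega]
  · rw [show List.filter (fun v => decide (x < v)) [a] = [] by simp [hax], List.append_nil]
    simp [pvHi, hax]

-- B's fold, evaluated on a sorted list
theorem pvFold_sorted (x : Int) (s : List Int) (hs : List.Pairwise (· ≤ ·) s) (hne : s ≠ []) :
    s.foldl (pvStep x) ((none, none), (none, none), none, none) =
      ((s.head?, s.tail.head?), (s.getLast?, s.dropLast.getLast?),
       (s.filter (fun v => decide (v ≤ x))).getLast?,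
       (s.filter (fun v => decide (x < v))).head?) := by
  induction s using List.reverseRecOn with
  | nil => exact absurd rfl hne
  | append_singleton s a ih =>
    rw [List.foldl_append]
    rcases eq_or_ne s [] with rfl | hsne
    · simp only [List.nil_append, List.foldl, pvStep, pvMinPair, pvMaxPair, pvLo, pvHi]
      by_cases hax : a ≤ x
      · simp [hax, show ¬ x < a by omega]
      · simp [hax, show x < a by omega]
    · obtain ⟨hs', -, hle⟩ := List.pairwise_append.mp hs
      have hle' : ∀ v ∈ s, v ≤ a := fun v hv => hle v hv a (by simp)
      rw [ih hs' hsne]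
      exact Prod.ext (pvMinPair_step s a hsne hle')
        (Prod.ext (pvMaxPair_step s a hsne hle')
          (Prod.ext (pvLo_step x s a hle') (pvHi_step x s a hle')))

-- a sorted list splits into its ≤ x prefix and its > x suffix
theorem pv_sorted_split (x : Int) (s : List Int) (hs : List.Pairwise (· ≤ ·) s) :
    s.filter (fun v => decide (v ≤ x)) ++ s.filter (fun v => decide (x < v)) = s := by
  induction s with
  | nil => rfl
  | cons h t ih =>
    rw [List.pairwise_cons] at hs
    obtain ⟨hht, ht⟩ := hs
    by_cases hx : h ≤ x
    · simp only [List.filter_cons, decide_eq_true_eq]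
      rw [if_pos hx, if_neg (by omega)]
      simpa using ih ht
    · simp only [List.filter_cons, decide_eq_true_eq]
      rw [if_neg hx, if_pos (by omega)]
      have h1 : t.filter (fun v => decide (v ≤ x)) = [] := by
        rw [List.filter_eq_nil_iff]
        intro v hv
        have := hht v hv
        simp only [decide_eq_true_eq]; omega
      have h2 : t.filter (fun v => decide (x < v)) = t := by
        rw [List.filter_eq_self]
        intro v hv
        have := hht v hv
        simp only [decide_eq_true_eq]; omega
      rw [h1, h2]
      rfl

-- A's loop skips the whole ≤ x prefix when a > x element follows
theorem pvALoop_skip (x : Int) (n : Nat) (s : List Int) (Q : List Int) (hQ : Q ≠ []) :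
    ∀ (P : List Int) (i : Nat), (∀ v ∈ P, v ≤ x) → i + P.length + Q.length = n →
    pvALoop x n s i (P ++ Q) = pvALoop x n s (i + P.length) Q := by
  intro P
  induction P with
  | nil => intro i _ _; simp
  | cons v t ih =>
    intro i hP hn
    have hQ1 : 1 ≤ Q.length := List.length_pos_iff.2 hQ
    simp only [List.cons_append, pvALoop]
    rw [if_pos ⟨hP v (List.mem_cons_self ..), by simp at hn ⊢; omega⟩]
    rw [ih (i + 1) (fun w hw => hP w (List.mem_cons_of_mem _ hw)) (by simp at hn ⊢; omega)]
    congr 1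
    simp; omega

-- A's loop on an all-≤-x list breaks at the last index
theorem pvALoop_last (x : Int) (n : Nat) (s : List Int) :
    ∀ (P : List Int) (i : Nat) (hne : P ≠ []), (∀ v ∈ P, v ≤ x) → i + P.length = n →
    pvALoop x n s i P = (PySem.List.pyGetD s ((n : Int) - 2) 0, P.getLast hne) := by
  intro P
  induction P with
  | nil => intro i hne; exact absurd rfl hne
  | cons v t ih =>
    intro i hne hP hn
    cases t with
    | nil =>
      simp only [pvALoop]
      rw [if_neg (by simp at hn ⊢; omega)]
      simp only [List.getLast_singleton]
      congr 1
      congr 1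
      simp at hn; omega
    | cons w t' =>
      have hstep : pvALoop x n s i (v :: w :: t')
          = if x ≥ v ∧ i ≠ n - 1 then pvALoop x n s (i + 1) (w :: t')
            else (PySem.List.pyGetD s ((i : Int) - 1) 0, v) := rfl
      rw [hstep, if_pos ⟨hP v (List.mem_cons_self ..), by simp at hn ⊢; omega⟩]
      rw [ih (i + 1) (by simp) (fun u hu => hP u (List.mem_cons_of_mem _ hu)) (by simp at hn ⊢; omega)]
      congr 1

theorem pv_head_le (a : Int) (t : List Int) (hpw : (a :: t).Pairwise (· ≤ ·))
    (v : Int) (hv : v ∈ a :: t) : a ≤ v := by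
  rcases List.mem_cons.mp hv with rfl | hv
  · exact le_refl _
  · exact (List.pairwise_cons.mp hpw).1 v hv

theorem pv_le_getLast (l : List Int) (hpw : l.Pairwise (· ≤ ·)) (hne : l ≠ [])
    (v : Int) (hv : v ∈ l) : v ≤ l.getLast hne := by
  obtain ⟨i, hi, rfl⟩ := List.mem_iff_getElem.mp hv
  rw [List.getLast_eq_getElem]
  rcases eq_or_lt_of_le (Nat.le_sub_one_of_lt hi) with he | hlt
  · exact le_of_eq (by congr 1)
  · exact (List.pairwise_iff_getElem.mp hpw) i (l.length - 1) hi (by omega) hlt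

theorem nearest_1d_point_helper_spec : Claim_equal_nearest_1d_point_helper := by
  intro x values inner_only _ hpre
  obtain ⟨hlen, hio⟩ := hpre
  simp only [Spec_nearest_1d_point_helper, nearest_1d_point_helper, nearest_1d_point_helper_alt]
  rw [if_neg (show ¬ values.length < 2 by omega), if_neg (show ¬ values.length < 2 by omega)]
  set s := PySem.List.sorted values (fun v => v) false with hsdef
  have hperm : s.Perm values := PySem.List.sorted_perm values (fun v => v) false
  have hlens : s.length = values.length := hperm.length_eq
  have hpw : List.Pairwise (· ≤ ·) s := PySem.List.sorted_pairwise values (fun v => v)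
  have hsne : s ≠ [] := by intro h; rw [h] at hlens; simp at hlens; omega
  have hmem : ∀ v, v ∈ values ↔ v ∈ s := fun v => (hperm.mem_iff).symm
  have hfold : values.foldl (pvStep x) ((none, none), (none, none), none, none)
      = s.foldl (pvStep x) ((none, none), (none, none), none, none) :=
    @List.Perm.foldl_eq _ _ (pvStep x) values s ⟨pvStep_comm x⟩ hperm.symm _
  rw [hfold, pvFold_sorted x s hpw hsne]
  obtain ⟨a0, a1, t1, hse⟩ : ∃ a0 a1 t1, s = a0 :: a1 :: t1 := by
    rcases s with _ | ⟨a0, t⟩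
    · exact absurd rfl hsne
    · rcases t with _ | ⟨a1, t1⟩
      · exfalso; rw [← hlens] at hlen; simp at hlen
      · exact ⟨a0, a1, t1, rfl⟩
  have h2s : 2 ≤ s.length := by omega
  obtain ⟨L, hL⟩ : ∃ L, s.getLast? = some L := ⟨_, List.getLast?_eq_some_getLast hsne⟩
  have hLval : s.getLast hsne = L := by
    rw [List.getLast?_eq_some_getLast hsne] at hL
    exact Option.some_injective _ hL
  have hLmem : L ∈ s := List.mem_of_getLast? hL
  have hLmax : ∀ v ∈ s, v ≤ L := fun v hv => hLval ▸ pv_le_getLast s hpw hsne v hv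
  have ha0min : ∀ v ∈ s, a0 ≤ v := by
    rw [hse] at hpw ⊢; exact fun v hv => pv_head_le a0 (a1 :: t1) hpw v hv
  have hdlne : s.dropLast ≠ [] := by rw [hse]; simp
  obtain ⟨M2, hM2⟩ : ∃ M2, s.dropLast.getLast? = some M2 := ⟨_, List.getLast?_eq_some_getLast hdlne⟩
  have hM2elem : M2 = s[s.length - 2]'(by omega) := by
    rw [List.getLast?_eq_some_getLast hdlne] at hM2
    have := Option.some_injective _ hM2
    rw [← this, List.getLast_eq_getElem, List.getElem_dropLast]
    congr 1
    simp [Nat.sub_sub]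
  have hhead : s.head? = some a0 := by rw [hse]; rfl
  have htail : s.tail.head? = some a1 := by rw [hse]; rfl
  have hget0 : PySem.List.pyGetD s 0 0 = a0 := by
    rw [hse]; exact PySem.List.pyGetD_zero_cons a0 (a1 :: t1) 0
  have hget1 : PySem.List.pyGetD s 1 0 = a1 := by
    rw [show (1 : Int) = ((1 : Nat) : Int) by norm_num, PySem.List.pyGetD_natCast]
    rw [hse]; rfl
  have hgetm1 : PySem.List.pyGetD s (-1) 0 = L := by
    rw [PySem.List.pyGetD_neg_one s 0 hsne, hLval]
  have hgetm2 : PySem.List.pyGetD s (-2) 0 = M2 := by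
    rw [PySem.List.pyGetD_neg_ofNat s 2 0 (by omega) (by omega), hM2elem]
  rw [hhead, htail, hL, hM2, hget0, hget1, hgetm1, hgetm2]
  by_cases hx0 : x < a0
  · -- x below the minimum: inner_only would have raised, so inner_only = false here
    have hinner : inner_only = false := by
      cases hbo : inner_only
      · rfl
      · exfalso
        obtain ⟨⟨v, hv, hvx⟩, -⟩ := hio hbo
        have := ha0min v ((hmem v).mp hv)
        omega
    simp [hx0, hinner]
  · have hsplit := pv_sorted_split x s hpw
    have ha0x : a0 ≤ x := by omega
    rcases hQe : s.filter (fun v => decide (x < v)) with _ | ⟨q, Qt⟩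
    · -- no element of values exceeds x
      have hall : ∀ v ∈ s, v ≤ x := by
        intro v hv
        by_contra hlt
        have : v ∈ s.filter (fun v => decide (x < v)) :=
          List.mem_filter.mpr ⟨hv, by simp; omega⟩
        rw [hQe] at this
        simp at this
      have hLx : L ≤ x := hall L hLmem
      by_cases hxL : x > L
      · -- x above the maximum: inner_only would have raised, so inner_only = false here
        have hinner : inner_only = false := by
          cases hbo : inner_only
          · rfl
          · exfalso
            obtain ⟨-, v, hv, hxv⟩ := hio hbo
            have := hLmax v ((hmem v).mp hv)
            omega
        simp [hx0, hxL, hinner]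
      · rw [if_neg hx0, if_neg hxL]
        have hA := pvALoop_last x s.length s s 0 hsne hall (Nat.zero_add _)
        have hpy : PySem.List.pyGetD s ((s.length : Int) - 2) 0 = M2 := by
          rw [show ((s.length : Int) - 2) = ((s.length - 2 : Nat) : Int) by omega,
            PySem.List.pyGetD_natCast, List.getD_eq_getElem?_getD,
            List.getElem?_eq_getElem (by omega)]
          rw [hM2elem]
          rfl
        rw [hA, hpy, hLval]
        simp [hxL, hx0]
    · -- q is the smallest element above x, the last element of P the largest ≤ x
      have hq : q ∈ s ∧ x < q := by
        have hq' : q ∈ s.filter (fun v => decide (x < v)) := by rw [hQe]; simp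
        have h' := List.mem_filter.mp hq'
        exact ⟨h'.1, by simpa using h'.2⟩
      have hxL : ¬ x > L := by have := hLmax q hq.1; omega
      set P := s.filter (fun v => decide (v ≤ x)) with hPdef
      have ha0P : a0 ∈ P := List.mem_filter.mpr ⟨by rw [hse]; simp, by simp; omega⟩
      have hPne : P ≠ [] := List.ne_nil_of_mem ha0P
      have hP1 : 1 ≤ P.length := List.length_pos_iff.2 hPne
      have hlenP : P.length + (q :: Qt).length = s.length := by
        have := congrArg List.length hsplit
        rw [hQe] at this
        simpa using this
      have hsPQ : s = P ++ q :: Qt := by conv_lhs => rw [← hsplit, hQe]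
      rw [if_neg hx0, if_neg hxL]
      have hA1 : pvALoop x s.length s 0 s = pvALoop x s.length s (0 + P.length) (q :: Qt) := by
        rw [congrArg (pvALoop x s.length s 0) hsPQ]
        exact pvALoop_skip x s.length s (q :: Qt) (by simp) P 0
          (fun v hv => by simpa using (List.mem_filter.mp hv).2) (by omega)
      have hA2 : pvALoop x s.length s (0 + P.length) (q :: Qt)
          = (PySem.List.pyGetD s (((0 + P.length : Nat) : Int) - 1) 0, q) := by
        simp only [pvALoop]
        rw [if_neg (by rintro ⟨h1, -⟩; have := hq.2; omega)]
      have hidx : P.length - 1 < s.length := by simp at hlenP; omega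
      have hPlast : PySem.List.pyGetD s (((0 + P.length : Nat) : Int) - 1) 0 = P.getLast hPne := by
        rw [show (((0 + P.length : Nat) : Int) - 1) = ((P.length - 1 : Nat) : Int) by push_cast; omega,
          PySem.List.pyGetD_natCast, List.getD_eq_getElem?_getD, hsPQ,
          List.getElem?_append_left (by omega), ← List.getLast?_eq_getElem?,
          List.getLast?_eq_some_getLast hPne]
        rfl
      rw [hA1, hA2, hPlast]
      simp [hx0, List.getLast?_eq_some_getLast hPne]
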